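-- pv_equiv track=rewrite | github.com/shreya-016/Udacity-Data-Structure-Project-3 | problem_3.py | rearrange_digits
-- ===== SOURCE A (Python) =====
-- def rearrange_digits(arr):
--
--     # O(nlog(n) complexity of implementing merge sort)
--     arr = mergesort(arr)
--
--     first = 0
--     for i in range(0, len(arr), 2):
--         first = first * 10 + arr[i]
--     second = 0
--     for i in range(1, len(arr), 2):
--         second = second * 10 + arr[i]
--
--     return [first, second]
--
-- def mergesort(arr):
--     n = len(arr)-1
--     split(arr, 0, n)
--     return arr
--
-- def split(arr, lo, hi):
--     if(lo < hi):
--         mid = (lo + hi) // 2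
--         split(arr, lo, mid)
--         split(arr, mid+1, hi)
--
--         merge(arr, lo, mid, hi)
--
-- def merge(arr, lo, mid, hi):
--     p = lo
--     q = mid + 1
--     arr2 = [None for _ in range(hi+1 - lo)]
--     k = 0
--
--     for i in range(lo, hi+1):
--         if (p > mid):
--             arr2[k] = arr[q]
--             k += 1
--             q += 1
--
--         elif (q > hi):
--             arr2[k] = arr[p]
--             k += 1
--             p += 1
--
--         # Adding the larger value
--         elif (arr[p] > arr[q]):
--             arr2[k] = arr[p]
--             k += 1
--             p += 1
--         else:
--             arr2[k] = arr[q]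
--             k += 1
--             q += 1
--
--     k = 0
--     while(k < len(arr2)):
--         arr[lo] = arr2[k]
--         lo += 1
--         k += 1
-- ===== SOURCE B (Python) =====
-- def rearrange_digits(arr):
--     first = second = 0
--     odd = False
--     for d in sorted(arr, reverse=True):
--         if odd:
--             second = second * 10 + d
--         else:
--             first = first * 10 + d
--         odd = not odd
--     return [first, second]
-- ===== Notes on version B (the rewrite author's own statement) =====
-- stated objective: alternative
-- what changed: Replaces the hand-written in-place recursive mergesort plus two separate step-2 index loops by the built-in sorted(reverse=True) and a single parity-alternating pass; B does not mutate the input list (A sorts it in place).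
import Mathlib
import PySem

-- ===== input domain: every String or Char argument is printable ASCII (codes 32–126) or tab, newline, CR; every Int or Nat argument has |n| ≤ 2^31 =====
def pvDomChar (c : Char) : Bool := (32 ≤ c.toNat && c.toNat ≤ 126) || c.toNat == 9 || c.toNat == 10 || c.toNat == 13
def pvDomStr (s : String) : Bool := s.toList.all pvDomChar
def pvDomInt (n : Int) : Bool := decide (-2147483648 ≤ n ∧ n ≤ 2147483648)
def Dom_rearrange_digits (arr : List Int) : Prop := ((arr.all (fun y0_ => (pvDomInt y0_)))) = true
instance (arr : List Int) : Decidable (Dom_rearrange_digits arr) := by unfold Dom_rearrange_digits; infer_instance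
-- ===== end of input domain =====

-- B replaces A's hand-written in-place recursive mergesort plus two step-2 index loops by the
-- library descending sort and one parity-alternating pass. A sorts its argument list in place
-- (caller-visible mutation); the equivalence proved here is about the RETURN value only —
-- B does not mutate its argument.

-- ===== PORT A =====
-- arr[i]; every read in A's calls is in range, so the default 0 is never returned
def pvGetI (a : List Int) (i : Int) : Int := PySem.List.pyGetD a i 0

-- the body of merge's "for i in range(lo, hi+1)" loop; arr2 is built by successive appends
-- (Python preallocates [None]*(hi+1-lo) and fills slot k sequentially — the same values)
def pvMergeStep (arr : List Int) (mid hi : Int) (st : List Int × Int × Int) (_i : Int) :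
    List Int × Int × Int :=
  let arr2 := st.1
  let p := st.2.1
  let q := st.2.2
  if p > mid then (arr2 ++ [pvGetI arr q], p, q + 1)
  else if q > hi then (arr2 ++ [pvGetI arr p], p + 1, q)
  else if pvGetI arr p > pvGetI arr q then (arr2 ++ [pvGetI arr p], p + 1, q)
  else (arr2 ++ [pvGetI arr q], p, q + 1)

-- the body of merge's write-back "while k < len(arr2)" loop
def pvWriteStep (wb : List Int × Int) (v : Int) : List Int × Int :=
  (PySem.List.pySetD wb.1 wb.2 v, wb.2 + 1)

def pvMerge (arr : List Int) (lo mid hi : Int) : List Int :=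
  let st := (PySem.List.pyRange lo (hi + 1) 1).foldl (pvMergeStep arr mid hi) ([], lo, mid + 1)
  (st.1.foldl pvWriteStep (arr, lo)).1

-- mid = (lo+hi)//2 lies in [lo, hi); cited by pvSplit's decreasing_by
theorem pvMid_bounds (lo hi : Int) (h : lo < hi) :
    lo ≤ PySem.Int.floordiv (lo + hi) 2 ∧ PySem.Int.floordiv (lo + hi) 2 < hi := by
  unfold PySem.Int.floordiv
  rw [Int.fdiv_eq_ediv]
  simp only [show ((0:Int) ≤ 2 ∨ (2:Int) ∣ lo + hi) = True from by simp, if_true]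
  omega

def pvSplit (arr : List Int) (lo hi : Int) : List Int :=
  if h : lo < hi then
    let mid := PySem.Int.floordiv (lo + hi) 2
    pvMerge (pvSplit (pvSplit arr lo mid) (mid + 1) hi) lo mid hi
  else arr
termination_by (hi - lo).toNat
decreasing_by
  · have := pvMid_bounds lo hi h; omega
  · have := pvMid_bounds lo hi h; omega

def rearrange_digits (arr : List Int) : List Int :=
  let arr := pvSplit arr 0 ((arr.length : Int) - 1)      -- arr = mergesort(arr)
  let first := (PySem.List.pyRange 0 (arr.length : Int) 2).foldl
    (fun f i => f * 10 + pvGetI arr i) 0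
  let second := (PySem.List.pyRange 1 (arr.length : Int) 2).foldl
    (fun s i => s * 10 + pvGetI arr i) 0
  [first, second]

-- ===== PORT B =====
-- loop body: state (first, second, odd)
def pvBStep (st : Int × Int × Bool) (d : Int) : Int × Int × Bool :=
  if st.2.2 then (st.1, st.2.1 * 10 + d, !st.2.2)
  else (st.1 * 10 + d, st.2.1, !st.2.2)

def rearrange_digits_alt (arr : List Int) : List Int :=
  let st := (PySem.List.sorted arr (fun x => x) true).foldl pvBStep (0, 0, false)
  [st.1, st.2.1]

-- ===== PRECONDITION & SPEC =====
def Spec_rearrange_digits (arr : List Int) (out : List Int) : Prop := out = rearrange_digits_alt arr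
instance (arr : List Int) (out : List Int) : Decidable (Spec_rearrange_digits arr out) := by unfold Spec_rearrange_digits; infer_instance

-- ===== CLAIM (what is proved, stated in full; the proofs are below) =====
def Claim_equal_rearrange_digits : Prop := ∀ (arr : List Int), Dom_rearrange_digits arr → Spec_rearrange_digits arr (rearrange_digits arr)

-- ===== LEMMAS AND PROOFS =====

-- functional descending merge (the value computed by merge's main loop)
def pvMergeD : List Int → List Int → List Int
  | [], r => r
  | a :: l, [] => a :: l
  | a :: l, b :: r => if a > b then a :: pvMergeD l (b :: r) else b :: pvMergeD (a :: l) r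

-- a list split into its even- and odd-indexed elements
def pvSplitPar : List Int → List Int × List Int
  | [] => ([], [])
  | a :: t => (a :: (pvSplitPar t).2, (pvSplitPar t).1)

-- digits folded into a number, starting from accumulator f
def pvNum (f : Int) (l : List Int) : Int := l.foldl (fun a d => a * 10 + d) f


theorem pvMergeD_perm (l r : List Int) : (pvMergeD l r).Perm (l ++ r) := by
  fun_induction pvMergeD with
  | case1 r => simp
  | case2 a l => simp
  | case3 a l b r h ih =>
    simpa using ih.cons a
  | case4 a l b r h ih =>
    exact (ih.cons b).trans List.perm_middle.symm

theorem pvMergeD_pairwise (l r : List Int)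
    (hl : l.Pairwise (fun a b => b ≤ a)) (hr : r.Pairwise (fun a b => b ≤ a)) :
    (pvMergeD l r).Pairwise (fun a b => b ≤ a) := by
  fun_induction pvMergeD with
  | case1 r => exact hr
  | case2 a l => exact hl
  | case3 a l b r h ih =>
    refine List.pairwise_cons.2 ⟨?_, ih (List.pairwise_cons.1 hl).2 hr⟩
    intro x hx
    have hx' := (pvMergeD_perm l (b :: r)).mem_iff.1 hx
    simp at hx'
    rcases hx' with h1 | rfl | h1
    · exact (List.pairwise_cons.1 hl).1 x h1
    · omega
    · have hb := (List.pairwise_cons.1 hr).1 x h1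
      omega
  | case4 a l b r h ih =>
    refine List.pairwise_cons.2 ⟨?_, ih hl (List.pairwise_cons.1 hr).2⟩
    intro x hx
    have hx' := (pvMergeD_perm (a :: l) r).mem_iff.1 hx
    simp at hx'
    rcases hx' with rfl | h1 | h1
    · omega
    · have := (List.pairwise_cons.1 hl).1 x h1
      omega
    · exact (List.pairwise_cons.1 hr).1 x h1

theorem pvMergeLoop (arr : List Int) (mid hi : Int) :
    ∀ (rng L R acc : List Int) (p q : Int),
    rng.length = L.length + R.length →
    p + L.length = mid + 1 → q + R.length = hi + 1 →
    (∀ j : Nat, j < L.length → pvGetI arr (p + j) = L.getD j 0) →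
    (∀ j : Nat, j < R.length → pvGetI arr (q + j) = R.getD j 0) →
    rng.foldl (pvMergeStep arr mid hi) (acc, p, q) = (acc ++ pvMergeD L R, mid + 1, hi + 1) := by
  intro rng
  induction rng with
  | nil =>
    intro L R acc p q hlen hp hq _ _
    have h0 : L.length + R.length = 0 := by simpa using hlen.symm
    have hL : L = [] := List.eq_nil_of_length_eq_zero (by omega)
    have hR : R = [] := List.eq_nil_of_length_eq_zero (by omega)
    subst hL; subst hR
    have hp' : p = mid + 1 := by simpa using hp
    have hq' : q = hi + 1 := by simpa using hq
    simp [pvMergeD, hp', hq']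
  | cons i rng ih =>
    intro L R acc p q hlen hp hq HL HR
    rw [List.foldl_cons]
    by_cases hpm : p > mid
    · -- L is empty
      have hL : L = [] := List.eq_nil_of_length_eq_zero (by omega)
      subst hL
      obtain ⟨r0, R', rfl⟩ : ∃ r0 R', R = r0 :: R' := by
        cases R with
        | nil => simp at hlen
        | cons r0 R' => exact ⟨r0, R', rfl⟩
      have hstep : pvMergeStep arr mid hi (acc, p, q) i = (acc ++ [pvGetI arr q], p, q + 1) := by
        simp only [pvMergeStep]; rw [if_pos hpm]
      rw [hstep]
      have hq0 : pvGetI arr q = r0 := by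
        have := HR 0 (by simp)
        simpa using this
      rw [hq0]
      have e1 : rng.length = ([] : List Int).length + R'.length := by
        simp only [List.length_cons, List.length_nil] at hlen ⊢; omega
      have e2 : p + ((([] : List Int).length : Nat) : Int) = mid + 1 := by simpa using hp
      have e3 : (q + 1) + (R'.length : Int) = hi + 1 := by simp only [List.length_cons] at hq; push_cast at hq ⊢; omega
      have e4 : ∀ j : Nat, j < ([] : List Int).length → pvGetI arr (p + j) = ([] : List Int).getD j 0 := by
        intro j hj; simp at hj
      have e5 : ∀ j : Nat, j < R'.length → pvGetI arr ((q + 1) + j) = R'.getD j 0 := by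
        intro j hj
        have h := HR (j + 1) (by simpa using Nat.succ_lt_succ hj)
        simpa [show q + ((j:Int) + 1) = q + 1 + (j:Int) by ring] using h
      have := ih [] R' (acc ++ [r0]) p (q + 1) e1 e2 e3 e4 e5
      rw [this]
      simp [pvMergeD]
    · have hpm' : ¬ (p > mid) := hpm
      obtain ⟨l0, L', rfl⟩ : ∃ l0 L', L = l0 :: L' := by
        cases L with
        | nil => exfalso; simp at hp; omega
        | cons l0 L' => exact ⟨l0, L', rfl⟩
      have hp0 : pvGetI arr p = l0 := by simpa using HL 0 (by simp)
      have HL' : ∀ j : Nat, j < L'.length → pvGetI arr ((p + 1) + j) = L'.getD j 0 := by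
        intro j hj
        have h := HL (j + 1) (by simpa using Nat.succ_lt_succ hj)
        simpa [show p + ((j:Int) + 1) = p + 1 + (j:Int) by ring] using h
      by_cases hqh : q > hi
      · have hR : R = [] := List.eq_nil_of_length_eq_zero (by omega)
        subst hR
        have hstep : pvMergeStep arr mid hi (acc, p, q) i = (acc ++ [pvGetI arr p], p + 1, q) := by
          simp only [pvMergeStep]
          rw [if_neg hpm, if_pos hqh]
        rw [hstep, hp0]
        have e1 : rng.length = L'.length + ([] : List Int).length := by
          simp only [List.length_cons, List.length_nil] at hlen ⊢; omega
        have e2 : (p + 1) + (L'.length : Int) = mid + 1 := by simp only [List.length_cons] at hp; push_cast at hp ⊢; omega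
        have e3 : q + (([] : List Int).length : Int) = hi + 1 := by simpa using hq
        have e4 : ∀ j : Nat, j < ([] : List Int).length → pvGetI arr (q + j) = ([] : List Int).getD j 0 := by
          intro j hj; simp at hj
        have := ih L' [] (acc ++ [l0]) (p + 1) q e1 e2 e3 HL' e4
        rw [this]
        cases L' <;> simp [pvMergeD]
      · obtain ⟨r0, R', rfl⟩ : ∃ r0 R', R = r0 :: R' := by
          cases R with
          | nil => exfalso; simp at hq; omega
          | cons r0 R' => exact ⟨r0, R', rfl⟩
        have hq0 : pvGetI arr q = r0 := by simpa using HR 0 (by simp)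
        have HR' : ∀ j : Nat, j < R'.length → pvGetI arr ((q + 1) + j) = R'.getD j 0 := by
          intro j hj
          have h := HR (j + 1) (by simpa using Nat.succ_lt_succ hj)
          simpa [show q + ((j:Int) + 1) = q + 1 + (j:Int) by ring] using h
        by_cases hcmp : pvGetI arr p > pvGetI arr q
        · have hstep : pvMergeStep arr mid hi (acc, p, q) i = (acc ++ [pvGetI arr p], p + 1, q) := by
            simp only [pvMergeStep]
            rw [if_neg hpm, if_neg hqh, if_pos hcmp]
          rw [hstep, hp0]
          have e1 : rng.length = L'.length + (r0 :: R').length := by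
            simp only [List.length_cons] at hlen ⊢; omega
          have e2 : (p + 1) + (L'.length : Int) = mid + 1 := by simp only [List.length_cons] at hp; push_cast at hp ⊢; omega
          have := ih L' (r0 :: R') (acc ++ [l0]) (p + 1) q e1 e2 hq HL' HR
          rw [this]
          rw [hp0, hq0] at hcmp
          simp [pvMergeD, if_pos hcmp]
        · have hstep : pvMergeStep arr mid hi (acc, p, q) i = (acc ++ [pvGetI arr q], p, q + 1) := by
            simp only [pvMergeStep]
            rw [if_neg hpm, if_neg hqh, if_neg hcmp]
          rw [hstep, hq0]
          have e1 : rng.length = (l0 :: L').length + R'.length := by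
            simp only [List.length_cons] at hlen ⊢; omega
          have e2 : (q + 1) + (R'.length : Int) = hi + 1 := by simp only [List.length_cons] at hq; push_cast at hq ⊢; omega
          have := ih (l0 :: L') R' (acc ++ [r0]) p (q + 1) e1 hp e2 HL HR'
          rw [this]
          rw [hp0, hq0] at hcmp
          simp [pvMergeD, if_neg hcmp]

theorem pvWriteback :
    ∀ (arr2 pre mseg post : List Int), mseg.length = arr2.length →
    arr2.foldl pvWriteStep (pre ++ mseg ++ post, (pre.length : Int)) =
      (pre ++ arr2 ++ post, (pre.length : Int) + arr2.length) := by
  intro arr2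
  induction arr2 with
  | nil =>
    intro pre mseg post h
    have : mseg = [] := List.eq_nil_of_length_eq_zero (by simpa using h)
    subst this
    simp
  | cons v arr2 ih =>
    intro pre mseg post h
    obtain ⟨m0, mseg', rfl⟩ : ∃ m0 mseg', mseg = m0 :: mseg' := by
      cases mseg with
      | nil => simp at h
      | cons m0 mseg' => exact ⟨m0, mseg', rfl⟩
    rw [List.foldl_cons]
    have hstep : pvWriteStep (pre ++ (m0 :: mseg') ++ post, (pre.length : Int)) v
        = ((pre ++ [v]) ++ mseg' ++ post, ((pre ++ [v]).length : Int)) := by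
      unfold pvWriteStep
      simp only
      rw [PySem.List.pySetD_natCast]
      rw [List.set_append]
      simp
    rw [hstep]
    have := ih (pre ++ [v]) mseg' post (by simp at h ⊢; omega)
    rw [this]
    simp
    omega

theorem pvMerge_spec (pre L R post : List Int) :
    pvMerge (pre ++ L ++ R ++ post) (pre.length : Int)
      ((pre.length : Int) + L.length - 1) ((pre.length : Int) + L.length + R.length - 1) =
      pre ++ pvMergeD L R ++ post := by
  unfold pvMerge
  have hrlen : (PySem.List.pyRange (pre.length : Int)
      ((pre.length : Int) + L.length + R.length - 1 + 1) 1).length = L.length + R.length := by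
    rw [PySem.List.length_pyRange_one]
    omega
  have HL : ∀ j : Nat, j < L.length →
      pvGetI (pre ++ L ++ R ++ post) ((pre.length : Int) + j) = L.getD j 0 := by
    intro j hj
    unfold pvGetI
    rw [show (pre.length : Int) + j = ((pre.length + j : Nat) : Int) by push_cast; ring,
      PySem.List.pyGetD_natCast]
    rw [List.append_assoc, List.append_assoc, List.getD_append_right pre _ _ _ (by omega)]
    rw [show pre.length + j - pre.length = j by omega]
    rw [List.getD_append _ _ _ _ hj]
  have HR : ∀ j : Nat, j < R.length →
      pvGetI (pre ++ L ++ R ++ post) (((pre.length : Int) + L.length - 1 + 1) + j)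
        = R.getD j 0 := by
    intro j hj
    unfold pvGetI
    rw [show (pre.length : Int) + L.length - 1 + 1 + j
        = ((pre.length + (L.length + j) : Nat) : Int) by push_cast; ring,
      PySem.List.pyGetD_natCast]
    rw [List.append_assoc, List.append_assoc, List.getD_append_right pre _ _ _ (by omega)]
    rw [show pre.length + (L.length + j) - pre.length = L.length + j by omega]
    rw [List.getD_append_right L _ _ _ (by omega)]
    rw [show L.length + j - L.length = j by omega]
    rw [List.getD_append _ _ _ _ hj]
  have hloop := pvMergeLoop (pre ++ L ++ R ++ post)
    ((pre.length : Int) + L.length - 1) ((pre.length : Int) + L.length + R.length - 1)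
    (PySem.List.pyRange (pre.length : Int) ((pre.length : Int) + L.length + R.length - 1 + 1) 1)
    L R [] (pre.length : Int) ((pre.length : Int) + L.length - 1 + 1)
    hrlen (by ring) (by ring)
    HL HR
  rw [show ((pre.length : Int) + L.length - 1 + 1) = (pre.length : Int) + L.length by ring] at hloop ⊢
  rw [hloop]
  simp only [List.nil_append]
  have hwb := pvWriteback (pvMergeD L R) pre (L ++ R) post
    (by simpa using ((pvMergeD_perm L R).length_eq).symm)
  rw [show pre ++ L ++ R ++ post = pre ++ (L ++ R) ++ post by simp [List.append_assoc]]
  rw [hwb]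

theorem pvSplit_spec :
    ∀ (n : Nat) (seg pre post : List Int), seg.length = n →
    ∃ S : List Int, S.Perm seg ∧ S.Pairwise (fun a b => b ≤ a) ∧
      pvSplit (pre ++ seg ++ post) (pre.length : Int) ((pre.length : Int) + seg.length - 1) =
        pre ++ S ++ post := by
  intro n
  induction n using Nat.strong_induction_on with
  | _ n ih =>
    intro seg pre post hn
    by_cases h : (pre.length : Int) < (pre.length : Int) + seg.length - 1
    · -- seg.length ≥ 2
      have hs2 : 2 ≤ seg.length := by omega
      set lo : Int := (pre.length : Int) with hlo
      set hi : Int := (pre.length : Int) + seg.length - 1 with hhi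
      obtain ⟨hm1, hm2⟩ := pvMid_bounds lo hi h
      set mid : Int := PySem.Int.floordiv (lo + hi) 2 with hmid
      set m : Nat := (mid + 1 - lo).toNat with hm
      have hm3 : (m : Int) = mid + 1 - lo := by rw [hm]; omega
      have hm4 : 1 ≤ m := by omega
      have hm5 : m ≤ seg.length - 1 := by omega
      have hseg1len : (seg.take m).length = m := by
        rw [List.length_take]; omega
      have hseg2len : (seg.drop m).length = seg.length - m := by
        rw [List.length_drop]
      obtain ⟨S1, p1, d1, e1⟩ := ih (seg.take m).length (by omega) (seg.take m) pre
        ((seg.drop m) ++ post) rfl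
      obtain ⟨S2, p2, d2, e2⟩ := ih (seg.drop m).length (by omega) (seg.drop m) (pre ++ S1)
        post rfl
      have hS1len : S1.length = m := by rw [p1.length_eq, hseg1len]
      have hS2len : S2.length = seg.length - m := by rw [p2.length_eq, hseg2len]
      -- rewrite e1's call to match pvSplit (pre ++ seg ++ post) lo mid
      have e1' : pvSplit (pre ++ seg ++ post) lo mid = pre ++ S1 ++ ((seg.drop m) ++ post) := by
        rw [show pre ++ seg ++ post = pre ++ (seg.take m) ++ ((seg.drop m) ++ post) by
              rw [List.append_assoc, List.append_assoc, ← List.append_assoc (seg.take m),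
                List.take_append_drop]]
        rw [show mid = (pre.length : Int) + (seg.take m).length - 1 by
              rw [hseg1len]; omega]
        exact e1
      have e2' : pvSplit (pre ++ S1 ++ ((seg.drop m) ++ post)) (mid + 1) hi
          = pre ++ S1 ++ (S2 ++ post) := by
        have hpl : ((pre ++ S1).length : Int) = mid + 1 := by
          rw [List.length_append]; push_cast; omega
        have : pvSplit ((pre ++ S1) ++ (seg.drop m) ++ post) ((pre ++ S1).length : Int)
            (((pre ++ S1).length : Int) + (seg.drop m).length - 1) = (pre ++ S1) ++ S2 ++ post := e2
        rw [hpl] at this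
        rw [show (mid + 1 + ((seg.drop m).length : Int) - 1) = hi by
              rw [hseg2len]; push_cast; omega] at this
        rw [show (pre ++ S1) ++ (seg.drop m) ++ post = pre ++ S1 ++ ((seg.drop m) ++ post) by
              simp [List.append_assoc]] at this
        rw [show (pre ++ S1) ++ S2 ++ post = pre ++ S1 ++ (S2 ++ post) by
              simp [List.append_assoc]] at this
        exact this
      refine ⟨pvMergeD S1 S2, ?_, pvMergeD_pairwise S1 S2 d1 d2, ?_⟩
      · exact (pvMergeD_perm S1 S2).trans ((p1.append p2).trans (by rw [List.take_append_drop]))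
      · rw [pvSplit]
        rw [dif_pos h]
        simp only
        rw [e1', e2']
        change pvMerge (pre ++ S1 ++ (S2 ++ post)) lo mid hi = pre ++ pvMergeD S1 S2 ++ post
        have hms := pvMerge_spec pre S1 S2 post
        rw [show pre ++ S1 ++ (S2 ++ post) = pre ++ S1 ++ S2 ++ post by simp [List.append_assoc]]
        rw [show mid = (pre.length : Int) + S1.length - 1 by rw [hS1len]; omega]
        rw [show hi = (pre.length : Int) + S1.length + S2.length - 1 by
              rw [hS1len, hS2len]; push_cast; omega]
        exact hms
    · refine ⟨seg, List.Perm.refl seg, ?_, ?_⟩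
      · rcases seg with _ | ⟨a, rest⟩
        · exact List.Pairwise.nil
        · rcases rest with _ | ⟨b, t⟩
          · simp
          · exfalso; simp at h; omega
      · rw [pvSplit, dif_neg h]

theorem pvDescUnique (xs ys : List Int) (hp : ys.Perm xs)
    (hd : ys.Pairwise (fun a b => b ≤ a)) :
    PySem.List.sorted xs (fun x => x) true = ys := by
  have h1 : (PySem.List.sorted xs (fun x => x) true).reverse.Pairwise
      (fun a b : Int => a ≤ b) := by
    rw [List.pairwise_reverse]
    exact PySem.List.sorted_pairwise_rev xs (fun x => x)
  have h2 := PySem.List.sorted_id_eq_of_perm_of_pairwise xs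
      (PySem.List.sorted xs (fun x => x) true).reverse
      ((List.reverse_perm _).trans (PySem.List.sorted_perm xs (fun x => x) true)) h1
  have h3 := PySem.List.sorted_id_eq_of_perm_of_pairwise xs ys.reverse
      ((List.reverse_perm _).trans hp) (by rw [List.pairwise_reverse]; exact hd)
  have := h2.symm.trans h3
  have := congrArg List.reverse this
  simpa using this

-- skip t1 lemmas, restate for use

theorem pvGetI_cons (a : Int) (t : List Int) (x : Int) (hx : 0 ≤ x) :
    pvGetI (a :: t) (x + 1) = pvGetI t x := by
  unfold pvGetI
  obtain ⟨k, rfl⟩ := Int.eq_ofNat_of_zero_le hx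
  rw [show ((k : Int) + 1) = ((k + 1 : Nat) : Int) by push_cast; ring]
  rw [PySem.List.pyGetD_natCast, PySem.List.pyGetD_natCast]
  simp [List.getD]

theorem pvRange2_shift (a b : Int) :
    PySem.List.pyRange (a + 1) (b + 1) 2 = (PySem.List.pyRange a b 2).map (· + 1) := by
  rw [PySem.List.pyRange_of_pos _ _ (by norm_num), PySem.List.pyRange_of_pos _ _ (by norm_num)]
  rw [List.map_map]
  have h2 : (if a + 1 < b + 1 then ((b + 1 - (a + 1) + 2 - 1) / 2).toNat else 0)
      = (if a < b then ((b - a + 2 - 1) / 2).toNat else 0) := by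
    split_ifs with h h' h' <;> omega
  rw [h2]
  apply List.map_congr_left
  intro k _
  simp
  ring

theorem pvRange2_cons (n : Int) (hn : 0 < n) :
    PySem.List.pyRange 0 n 2 = 0 :: PySem.List.pyRange 2 n 2 := by
  rw [PySem.List.pyRange_of_pos _ _ (by norm_num), PySem.List.pyRange_of_pos _ _ (by norm_num)]
  rw [if_pos hn]
  have hc : ((n - 0 + 2 - 1) / 2).toNat = (if 2 < n then ((n - 2 + 2 - 1) / 2).toNat else 0) + 1 := by
    split_ifs with h2 <;> omega
  rw [hc, List.range_succ_eq_map]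
  simp only [List.map_cons, List.map_map]
  refine congrArg₂ (· :: ·) (by norm_num) ?_
  apply List.map_congr_left
  simp only [List.mem_range, Function.comp_apply, Nat.succ_eq_add_one]
  intro k _
  push_cast
  ring

theorem pvMapPar (ys : List Int) :
    (PySem.List.pyRange 0 (ys.length : Int) 2).map (pvGetI ys) = (pvSplitPar ys).1 ∧
    (PySem.List.pyRange 1 (ys.length : Int) 2).map (pvGetI ys) = (pvSplitPar ys).2 := by
  induction ys with
  | nil =>
    constructor <;> · rw [PySem.List.pyRange_of_pos _ _ (by norm_num)]; simp [pvSplitPar]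
  | cons a t ih =>
    have hlen : ((a :: t).length : Int) = (t.length : Int) + 1 := by simp
    have hshift : ∀ (s : Int), 0 ≤ s →
        (PySem.List.pyRange (s + 1) ((t.length : Int) + 1) 2).map (pvGetI (a :: t)) =
        (PySem.List.pyRange s (t.length : Int) 2).map (pvGetI t) := by
      intro s hs
      rw [pvRange2_shift s (t.length : Int), List.map_map]
      apply List.map_congr_left
      intro x hxmem
      have hx : s ≤ x :=
        ((PySem.List.mem_pyRange_iff_of_pos (by norm_num) x).1 hxmem).1
      simp only [Function.comp_apply]
      exact pvGetI_cons a t x (le_trans hs hx)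
    constructor
    · rw [hlen, pvRange2_cons _ (by omega)]
      rw [List.map_cons]
      have h1 : PySem.List.pyRange 2 ((t.length : Int) + 1) 2
          = PySem.List.pyRange (1 + 1) ((t.length : Int) + 1) 2 := by norm_num
      rw [h1, hshift 1 (by norm_num)]
      have h0 : pvGetI (a :: t) 0 = a := by
        unfold pvGetI
        rw [show (0 : Int) = ((0 : Nat) : Int) by norm_num, PySem.List.pyGetD_natCast]
        rfl
      rw [h0, ih.2]
      rfl
    · have h2 : PySem.List.pyRange 1 ((t.length : Int) + 1) 2
          = PySem.List.pyRange (0 + 1) ((t.length : Int) + 1) 2 := by norm_num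
      rw [hlen, h2, hshift 0 le_rfl, ih.1]
      rfl

theorem pvBfold (t : List Int) : ∀ (f s : Int) (o : Bool),
    t.foldl pvBStep (f, s, o) =
      (pvNum f (if o then (pvSplitPar t).2 else (pvSplitPar t).1),
       pvNum s (if o then (pvSplitPar t).1 else (pvSplitPar t).2),
       xor (t.length % 2 == 1) o) := by
  induction t with
  | nil => intro f s o; cases o <;> simp [pvSplitPar, pvNum]
  | cons a t ih =>
    intro f s o
    cases o with
    | false =>
      have hstep : pvBStep (f, s, false) a = (f * 10 + a, s, true) := by
        simp [pvBStep]
      rw [List.foldl_cons, hstep, ih (f * 10 + a) s true]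
      simp only [pvSplitPar, pvNum, List.length_cons, if_true, Bool.false_eq_true,
        if_false, Prod.mk.injEq, List.foldl_cons]
      refine ⟨trivial, trivial, ?_⟩
      rcases Nat.mod_two_eq_zero_or_one t.length with h | h <;>
        simp [Nat.add_mod, h]
    | true =>
      have hstep : pvBStep (f, s, true) a = (f, s * 10 + a, false) := by
        simp [pvBStep]
      rw [List.foldl_cons, hstep, ih f (s * 10 + a) false]
      simp only [pvSplitPar, pvNum, List.length_cons, if_true, Bool.false_eq_true,
        if_false, Prod.mk.injEq, List.foldl_cons]
      refine ⟨trivial, trivial, ?_⟩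
      rcases Nat.mod_two_eq_zero_or_one t.length with h | h <;>
        simp [Nat.add_mod, h]

-- ===== VERDICT (by name: the statement is the Claim_ definition above) =====
theorem rearrange_digits_spec : Claim_equal_rearrange_digits := by
  intro arr _
  unfold Spec_rearrange_digits rearrange_digits rearrange_digits_alt
  obtain ⟨S, hperm, hpair, heq⟩ := pvSplit_spec arr.length arr [] [] rfl
  have heq' : pvSplit arr 0 ((arr.length : Int) - 1) = S := by
    simpa using heq
  have hsort : PySem.List.sorted arr (fun x => x) true = S := pvDescUnique arr S hperm hpair
  rw [heq', hsort, pvBfold S 0 0 false]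
  simp only [Bool.false_eq_true, if_false]
  rw [← List.foldl_map (f := pvGetI S) (g := fun a d => a * 10 + d),
    ← List.foldl_map (f := pvGetI S) (g := fun a d => a * 10 + d)]
  rw [(pvMapPar S).1, (pvMapPar S).2]
  rfl
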